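-- pv_equiv track=rewrite | github.com/Stiegemeierr/ELC123---Comunica-o-de-Dados | Trabalho1/codificadores.py | b8zs
-- ===== SOURCE A (Python) =====
-- def b8zs(bits: str) -> list[int]:
--     result = []
--     last_polarity = 1
--
--     i = 0
--     while i < len(bits):
--         if i <= len(bits) - 8 and bits[i:i+8] == "00000000":
--             if last_polarity == 1:
--                 result.extend([0, 0, 0, -1, 1, 0, 1, -1])
--                 last_polarity = -1
--             else:
--                 result.extend([0, 0, 0, 1, -1, 0, -1, 1])
--                 last_polarity = 1
--             i += 8
--         else:
--             # codificação AMI normal para outros bits (se input menor que 0 bits)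
--             bit = int(bits[i])
--             if bit == 0:
--                 result.append(0)
--             else:
--                 result.append(last_polarity)
--                 last_polarity = -last_polarity
--             i += 1
--
--     return result
-- ===== SOURCE B (Python) =====
-- def b8zs(bits: str) -> list[int]:
--     # Segment-based: locate the non-overlapping 8-zero blocks up front with str.find,
--     # AMI-encode the plain segments between them, emit each block from the current polarity.
--     result = []
--     pol = 1
--     pos = 0
--     n = len(bits)
--     while pos < n:
--         j = bits.find("00000000", pos)
--         if j < 0:
--             j = n
--         for ch in bits[pos:j]:
--             if int(ch) == 0:
--                 result.append(0)
--             else: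
--                 result.append(pol)
--                 pol = -pol
--         if j < n:
--             result.extend([0, 0, 0, -pol, pol, 0, pol, -pol])
--             pol = -pol
--         pos = j + 8
--     return result
-- ===== Notes on version B (the rewrite author's own statement) =====
-- stated objective: alternative
-- what changed: Replaces the per-index while-loop that re-tests an 8-zero slice at every position with a segment decomposition: str.find locates each non-overlapping 8-zero block, the plain stretches between blocks are AMI-encoded in an inner for-loop, and each block is emitted as one polarity-parametrised 8-tuple [0,0,0,-p,p,0,p,-p] instead of two hard-coded branches.
import Mathlib
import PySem

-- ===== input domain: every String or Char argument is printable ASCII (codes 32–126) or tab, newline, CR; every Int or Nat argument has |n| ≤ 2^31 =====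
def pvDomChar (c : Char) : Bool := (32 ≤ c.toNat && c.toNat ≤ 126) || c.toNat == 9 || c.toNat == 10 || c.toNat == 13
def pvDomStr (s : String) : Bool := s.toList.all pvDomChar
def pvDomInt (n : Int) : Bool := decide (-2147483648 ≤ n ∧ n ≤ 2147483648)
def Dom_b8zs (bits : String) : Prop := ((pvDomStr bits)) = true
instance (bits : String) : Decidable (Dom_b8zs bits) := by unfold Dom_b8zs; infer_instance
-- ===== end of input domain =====

-- B replaces A's per-index scan (slice test at every position) by a segment decomposition driven
-- by str.find: AMI-encode the stretches between the non-overlapping 8-zero blocks, emit each block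
-- as one polarity-parametrised 8-tuple. Objective: alternative decomposition (same cost).

-- the searched/compared block "00000000"
def pvZeros8 : List Char := ['0', '0', '0', '0', '0', '0', '0', '0']

-- ===== PORT A =====
-- literal port of A's while-loop; on the inputs excluded by Pre_ (a non-digit char, where
-- Python's int() raises ValueError) the port returns the output built so far.
def b8zsGo (s : List Char) (i : Nat) (pol : Int) (acc : List Int) : List Int :=
  if h : i < s.length then
    if i + 8 ≤ s.length ∧ PySem.List.slice s (some (i : Int)) (some ((i + 8 : Nat) : Int)) = pvZeros8 then
      if pol = 1 then
        b8zsGo s (i + 8) (-1) (acc ++ [0, 0, 0, -1, 1, 0, 1, -1])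
      else
        b8zsGo s (i + 8) 1 (acc ++ [0, 0, 0, 1, -1, 0, -1, 1])
    else
      match PySem.Int.ofChars? [s[i]] with
      | some bit =>
          if bit = 0 then b8zsGo s (i + 1) pol (acc ++ [0])
          else b8zsGo s (i + 1) (-pol) (acc ++ [pol])
      | none => acc   -- int() raises ValueError here; outside Pre_
  else acc
termination_by s.length - i

def b8zs (bits : String) : List Int := b8zsGo bits.toList 0 1 []

-- ===== PORT B =====
-- AMI encoding of one plain segment (B's inner for-loop); the Bool is false when int() raises
def pvAmi : List Char → Int → List Int → List Int × Int × Bool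
  | [], pol, acc => (acc, pol, true)
  | c :: cs, pol, acc =>
    match PySem.Int.ofChars? [c] with
    | none => (acc, pol, false)   -- ValueError; outside Pre_
    | some bit =>
        if bit = 0 then pvAmi cs pol (acc ++ [0])
        else pvAmi cs (-pol) (acc ++ [pol])

-- j of B's loop body: bits.find("00000000", pos), replaced by len(bits) when -1
def pvFindJ (s : List Char) (pos : Nat) : Nat :=
  if PySem.Chars.findFrom s pvZeros8 (pos : Int) < 0 then s.length
  else (PySem.Chars.findFrom s pvZeros8 (pos : Int)).toNat

-- bounds the port's termination argument cites
theorem pvFindJ_lb (s : List Char) (pos : Nat) (h : pos ≤ s.length) : pos ≤ pvFindJ s pos := by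
  unfold pvFindJ
  split
  · exact h
  · rename_i hlt
    have hne : PySem.Chars.findFrom s pvZeros8 (pos : Int) ≠ -1 := by omega
    have := (PySem.Chars.findFrom_natCast_spec s pvZeros8 pos h hne).1
    omega

def b8zsAltGo (s : List Char) (pos : Nat) (pol : Int) (acc : List Int) : List Int :=
  if h : pos < s.length then
    match pvAmi (PySem.List.slice s (some (pos : Int)) (some ((pvFindJ s pos : Nat) : Int))) pol acc with
    | (acc', pol', true) =>
        if pvFindJ s pos < s.length then
          b8zsAltGo s (pvFindJ s pos + 8) (-pol') (acc' ++ [0, 0, 0, -pol', pol', 0, pol', -pol'])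
        else
          b8zsAltGo s (pvFindJ s pos + 8) pol' acc'
    | (acc', _, false) => acc'   -- ValueError inside the segment; outside Pre_
  else acc
termination_by s.length - pos
decreasing_by
  all_goals (have := pvFindJ_lb s pos (le_of_lt h); omega)

def b8zs_alt (bits : String) : List Int := b8zsAltGo bits.toList 0 1 []

-- ===== PRECONDITION & SPEC =====
-- Pre_ excludes exactly the strings containing a non-digit character, on which Python's int(bits[i])
-- raises ValueError in both A and B.
def Pre_b8zs (bits : String) : Prop := bits.toList.all PySem.Chars.isdigit = true
instance (bits : String) : Decidable (Pre_b8zs bits) := by unfold Pre_b8zs; infer_instance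

def pvWitness_b8zs : String := "0100000000"

def Spec_b8zs (bits : String) (out : List Int) : Prop := out = b8zs_alt bits
instance (bits : String) (out : List Int) : Decidable (Spec_b8zs bits out) := by unfold Spec_b8zs; infer_instance

-- ===== CLAIM (what is proved, stated in full; the proofs are below) =====
def Claim_equal_b8zs : Prop := ∀ (bits : String), Dom_b8zs bits → Pre_b8zs bits → Spec_b8zs bits (b8zs bits)

-- ===== LEMMAS AND PROOFS =====

theorem pvAmi_pol (cs : List Char) (pol : Int) (acc : List Int) (hp : pol = 1 ∨ pol = -1) :
    (pvAmi cs pol acc).2.1 = 1 ∨ (pvAmi cs pol acc).2.1 = -1 := by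
  induction cs generalizing pol acc with
  | nil => simpa [pvAmi] using hp
  | cons c cs ih =>
    simp only [pvAmi]
    cases PySem.Int.ofChars? [c] with
    | none => simpa using hp
    | some bit =>
      by_cases hb : bit = 0
      · simpa [hb] using ih pol (acc ++ [0]) hp
      · simpa [hb] using ih (-pol) (acc ++ [pol]) (by omega)

-- A's loop over a stretch with no 8-zero block is exactly pvAmi on that stretch
theorem goA_seg (s : List Char) (d : Nat) :
    ∀ (pos : Nat) (pol : Int) (acc : List Int),
      pos + d ≤ s.length →
      (∀ i, pos ≤ i → i < pos + d → ¬ pvZeros8 <+: s.drop i) →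
      b8zsGo s pos pol acc =
        (match pvAmi ((s.drop pos).take d) pol acc with
         | (acc', pol', true) => b8zsGo s (pos + d) pol' acc'
         | (acc', _, false) => acc') := by
  induction d with
  | zero => intro pos pol acc _ _; simp [pvAmi]
  | succ d ih =>
    intro pos pol acc hle hnb
    have hpos : pos < s.length := by omega
    have hdrop : s.drop pos = s[pos] :: s.drop (pos + 1) := (List.getElem_cons_drop hpos).symm
    have hnotblk : ¬ (pos + 8 ≤ s.length ∧
        PySem.List.slice s (some (pos : Int)) (some ((pos + 8 : Nat) : Int)) = pvZeros8) := by
      rintro ⟨h8, hsl⟩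
      refine hnb pos le_rfl (by omega) ?_
      rw [PySem.List.slice_natCast] at hsl
      have : (pos + 8 - pos) = 8 := by omega
      rw [this] at hsl
      exact hsl ▸ List.take_prefix 8 (s.drop pos)
    rw [b8zsGo, dif_pos hpos, if_neg hnotblk]
    have hseg : (s.drop pos).take (d + 1) = s[pos] :: (s.drop (pos + 1)).take d := by
      rw [hdrop, List.take_succ_cons]
    rw [hseg]
    simp only [pvAmi]
    cases PySem.Int.ofChars? [s[pos]] with
    | none => rfl
    | some bit =>
      by_cases hb : bit = 0
      · have hpp : pos + 1 + d = pos + (d + 1) := by omega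
        have hstep := ih (pos + 1) pol (acc ++ [0]) (by omega)
          (fun i h1 h2 => hnb i (by omega) (by omega))
        rw [hpp] at hstep
        simp only [if_pos hb]
        exact hstep
      · have hpp : pos + 1 + d = pos + (d + 1) := by omega
        have hstep := ih (pos + 1) (-pol) (acc ++ [pol]) (by omega)
          (fun i h1 h2 => hnb i (by omega) (by omega))
        rw [hpp] at hstep
        simp only [if_neg hb]
        exact hstep

theorem go_eq_altGo (s : List Char) (m : Nat) :
    ∀ (pos : Nat) (pol : Int) (acc : List Int),
      s.length - pos ≤ m → (pol = 1 ∨ pol = -1) →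
      b8zsGo s pos pol acc = b8zsAltGo s pos pol acc := by
  induction m with
  | zero =>
    intro pos pol acc hm _
    have hge : ¬ pos < s.length := by omega
    rw [b8zsGo, dif_neg hge, b8zsAltGo, dif_neg hge]
  | succ m ih =>
    intro pos pol acc hm hp
    by_cases hpos : pos < s.length
    · have hposle : pos ≤ s.length := le_of_lt hpos
      by_cases hj : PySem.Chars.findFrom s pvZeros8 (pos : Int) = -1
      · -- no further 8-zero block: the tail is one AMI segment
        have hj' : pvFindJ s pos = s.length := by unfold pvFindJ; rw [hj]; norm_num
        have hninf : ¬ pvZeros8 <:+: s.drop pos :=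
          (PySem.Chars.findFrom_natCast_eq_neg_one_iff s pvZeros8 pos hposle).mp hj
        have hnb : ∀ i, pos ≤ i → i < pos + (s.length - pos) → ¬ pvZeros8 <+: s.drop i := by
          intro i h1 _ hpre
          refine hninf ?_
          have hdd : s.drop i = (s.drop pos).drop (i - pos) := by
            rw [List.drop_drop]; congr 1; omega
          rw [hdd] at hpre
          exact hpre.isInfix.trans (List.drop_suffix (i - pos) (s.drop pos)).isInfix
        have hA := goA_seg s (s.length - pos) pos pol acc (by omega) hnb
        rw [hA, b8zsAltGo, dif_pos hpos, hj', PySem.List.slice_natCast]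
        rcases hami : pvAmi ((s.drop pos).take (s.length - pos)) pol acc with ⟨acc', pol', ok⟩
        cases ok with
        | true =>
          dsimp only
          have hend : pos + (s.length - pos) = s.length := by omega
          rw [hend, if_neg (by omega : ¬ s.length < s.length)]
          rw [b8zsGo, dif_neg (by omega), b8zsAltGo, dif_neg (by omega)]
        | false => rfl
      · -- a block found at j: AMI up to j, emit the block, continue past it
        obtain ⟨hjge, hjpre, hjmin⟩ :=
          PySem.Chars.findFrom_natCast_spec s pvZeros8 pos hposle hj
        have hjnn : 0 ≤ PySem.Chars.findFrom s pvZeros8 (pos : Int) := by omega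
        have hj' : pvFindJ s pos = (PySem.Chars.findFrom s pvZeros8 (pos : Int)).toNat := by
          unfold pvFindJ; rw [if_neg (by omega)]
        set j := (PySem.Chars.findFrom s pvZeros8 (pos : Int)).toNat with hjdef
        have hposj : pos ≤ j := by omega
        have hjub : j + 8 ≤ s.length := by
          have := hjpre.length_le
          simp only [List.length_drop] at this
          have h8 : pvZeros8.length = 8 := rfl
          omega
        have hnb : ∀ i, pos ≤ i → i < pos + (j - pos) → ¬ pvZeros8 <+: s.drop i := by
          intro i h1 h2
          exact hjmin i h1 (by omega)
        have hA := goA_seg s (j - pos) pos pol acc (by omega) hnb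
        have hposd : pos + (j - pos) = j := by omega
        rw [hposd] at hA
        rw [hA, b8zsAltGo, dif_pos hpos, hj', PySem.List.slice_natCast]
        have hjj : j - pos = j - pos := rfl
        rcases hami : pvAmi ((s.drop pos).take (j - pos)) pol acc with ⟨acc', pol', ok⟩
        cases ok with
        | true =>
          have hpol' : pol' = 1 ∨ pol' = -1 := by
            have := pvAmi_pol ((s.drop pos).take (j - pos)) pol acc hp
            rw [hami] at this
            exact this
          have hblk : j + 8 ≤ s.length ∧
              PySem.List.slice s (some (j : Int)) (some ((j + 8 : Nat) : Int)) = pvZeros8 := by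
            refine ⟨hjub, ?_⟩
            rw [PySem.List.slice_natCast]
            have h1 : j + 8 - j = 8 := by omega
            rw [h1]
            have h8 : pvZeros8.length = 8 := rfl
            have := List.prefix_iff_eq_take.mp hjpre
            rw [h8] at this
            exact this.symm
          dsimp only
          rw [if_pos (by omega : j < s.length), b8zsGo, dif_pos (by omega : j < s.length),
            if_pos hblk]
          rcases hpol' with hp1 | hp1
          · rw [if_pos hp1, hp1]
            exact ih (j + 8) (-1) (acc' ++ [0, 0, 0, -1, 1, 0, 1, -1]) (by omega) (by omega)
          · rw [if_neg (by omega), hp1]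
            norm_num
            exact ih (j + 8) 1 (acc' ++ [0, 0, 0, 1, -1, 0, -1, 1]) (by omega) (by omega)
        | false => dsimp only
    · rw [b8zsGo, dif_neg hpos, b8zsAltGo, dif_neg hpos]

-- ===== VERDICT (by name: the statement is the Claim_ definition above) =====
theorem b8zs_spec : Claim_equal_b8zs := by
  intro bits _ _
  unfold Spec_b8zs b8zs b8zs_alt
  exact go_eq_altGo bits.toList bits.toList.length 0 1 [] (by omega) (Or.inl rfl)
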